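-- pv_equiv track=rewrite | github.com/3ntropia/pythonDojo | matrix/m2/m2.py | sixth_matrix
-- ===== SOURCE A (Python) =====
-- def sixth_matrix(size):
--     m = []
--     num = 1
--     for i in range(size):
--         row = []
--         for j in range(size, 0, -1):
--             if j >= size - i:
--                 row.insert(0, num)
--                 num += 1
--             else:
--                 row.insert(0, 0)
--         m.append(row)
--     return m
-- ===== SOURCE B (Python) =====
-- def sixth_matrix(size):
--     res = []
--     for i in range(size):
--         base = i * (i + 1) // 2
--         res.append([0] * (size - 1 - i) + list(range(base + i + 1, base, -1)))
--     return res
-- ===== Notes on version B (the rewrite author's own statement) =====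
-- stated objective: simpler
-- what changed: Replaced the sequential counter threaded across rows and the per-cell front-insertion inner loop by a per-row closed form: base = i*(i+1)//2 gives the counter directly, and each row is [0]*(size-1-i) plus a descending range, computed independently.
import Mathlib
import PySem

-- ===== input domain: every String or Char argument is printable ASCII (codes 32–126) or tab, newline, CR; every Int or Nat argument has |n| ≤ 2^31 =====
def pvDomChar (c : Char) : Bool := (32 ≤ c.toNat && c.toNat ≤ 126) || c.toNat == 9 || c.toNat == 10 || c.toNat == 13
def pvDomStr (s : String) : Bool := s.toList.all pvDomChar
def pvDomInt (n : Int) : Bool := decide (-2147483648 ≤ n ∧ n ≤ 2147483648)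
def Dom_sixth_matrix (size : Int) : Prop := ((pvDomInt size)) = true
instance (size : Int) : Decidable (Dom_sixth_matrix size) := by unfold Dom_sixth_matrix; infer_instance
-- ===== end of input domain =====

-- B replaces A's stateful counter and per-cell front-insertion with a per-row closed form
-- (base = i*(i+1)//2, row = zeros ++ descending range): simpler, each row independent.

-- ===== PORT A =====
def sixth_matrix (size : Int) : List (List Int) :=
  ((PySem.List.pyRange 0 size 1).foldl
    (fun (st : List (List Int) × Int) i =>
      let r := (PySem.List.pyRange size 0 (-1)).foldl
        (fun (st2 : List Int × Int) j =>
          if size - i ≤ j then (PySem.List.insert st2.1 0 st2.2, st2.2 + 1)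
          else (PySem.List.insert st2.1 0 0, st2.2))
        ([], st.2)
      (st.1 ++ [r.1], r.2))
    ([], 1)).1

-- ===== PORT B =====
def sixth_matrix_alt (size : Int) : List (List Int) :=
  (PySem.List.pyRange 0 size 1).foldl
    (fun (res : List (List Int)) i =>
      let base := PySem.Int.floordiv (i * (i + 1)) 2
      res ++ [List.replicate (size - 1 - i).toNat 0 ++ PySem.List.pyRange (base + i + 1) base (-1)])
    []

-- ===== PRECONDITION & SPEC =====
def Spec_sixth_matrix (size : Int) (out : List (List Int)) : Prop := out = sixth_matrix_alt size
instance (size : Int) (out : List (List Int)) : Decidable (Spec_sixth_matrix size out) := by unfold Spec_sixth_matrix; infer_instance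

-- ===== CLAIM (what is proved, stated in full; the proofs are below) =====
def Claim_equal_sixth_matrix : Prop := ∀ (size : Int), Dom_sixth_matrix size → Spec_sixth_matrix size (sixth_matrix size)

-- ===== LEMMAS AND PROOFS =====

-- Inner-loop step function of A's port, abstracted for the lemmas.
def pvStep (size i : Int) (st2 : List Int × Int) (j : Int) : List Int × Int :=
  if size - i ≤ j then (PySem.List.insert st2.1 0 st2.2, st2.2 + 1)
  else (PySem.List.insert st2.1 0 0, st2.2)

-- Peeling the smallest element off a countdown range, at the right end.
lemma pvRange_snoc (a b : Int) (h : b ≤ a) :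
    PySem.List.pyRange a (b - 1) (-1) = PySem.List.pyRange a b (-1) ++ [b] := by
  rw [PySem.List.pyRange_neg_one_eq_reverse, PySem.List.pyRange_neg_one_eq_reverse,
      show b - 1 + 1 = b by ring,
      PySem.List.pyRange_one_cons (by omega : b < a + 1)]
  simp

-- Segment where the condition holds: each j prepends the counter and bumps it.
lemma pvFold_hi (size i : Int) : ∀ (L : List Int), (∀ j ∈ L, size - i ≤ j) →
    ∀ (row : List Int) (num : Int),
    L.foldl (pvStep size i) (row, num)
      = (PySem.List.pyRange (num + L.length - 1) (num - 1) (-1) ++ row, num + L.length) := by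
  intro L
  induction L with
  | nil => intro _ row num; simp [PySem.List.pyRange_neg_one_eq_nil (by omega : num - 1 ≥ num - 1)]
  | cons a L ih =>
    intro h row num
    have ha : size - i ≤ a := h a (List.mem_cons_self ..)
    have hrec := ih (fun j hj => h j (List.mem_cons_of_mem a hj)) (num :: row) (num + 1)
    simp only [List.foldl_cons, pvStep, if_pos ha, PySem.List.insert_zero]
    rw [hrec, Prod.mk.injEq]
    have hk : (0:Int) ≤ (L.length : Int) := by positivity
    constructor
    · rw [show num + 1 + (L.length : Int) - 1 = num + (L.length : Int) by ring,
          show num + 1 - 1 = num by ring,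
          show num + (((a :: L).length : Nat) : Int) - 1 = num + (L.length : Int) + 1 - 1 by
            push_cast [List.length_cons]; ring,
          show num + (L.length : Int) + 1 - 1 = num + (L.length : Int) by ring,
          show (num - 1) = num - 1 by ring,
          pvRange_snoc (num + (L.length : Int)) num (by omega)]
      simp
    · push_cast [List.length_cons]; ring

-- Segment where the condition fails: each j prepends a zero.
lemma pvFold_lo (size i : Int) : ∀ (L : List Int), (∀ j ∈ L, j < size - i) →
    ∀ (row : List Int) (num : Int),
    L.foldl (pvStep size i) (row, num) = (List.replicate L.length 0 ++ row, num) := by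
  intro L
  induction L with
  | nil => intro _ row num; simp
  | cons a L ih =>
    intro h row num
    have ha : ¬ (size - i ≤ a) := by
      have := h a (List.mem_cons_self ..); omega
    have hrec := ih (fun j hj => h j (List.mem_cons_of_mem a hj)) ((0:Int) :: row) num
    simp only [List.foldl_cons, pvStep, if_neg ha, PySem.List.insert_zero]
    rw [hrec, List.length_cons, List.replicate_succ', List.append_assoc]
    rfl

-- Full inner loop of A, for 0 ≤ i < size.
lemma pvInner (size i : Int) (h0 : 0 ≤ i) (h1 : i < size) (num : Int) :
    (PySem.List.pyRange size 0 (-1)).foldl (pvStep size i) ([], num)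
      = (List.replicate (size - 1 - i).toNat 0
          ++ PySem.List.pyRange (num + i) (num - 1) (-1), num + i + 1) := by
  have hsplit : PySem.List.pyRange size 0 (-1)
      = PySem.List.pyRange size (size - i - 1) (-1)
        ++ PySem.List.pyRange (size - i - 1) 0 (-1) := by
    rw [PySem.List.pyRange_neg_one_eq_reverse, PySem.List.pyRange_neg_one_eq_reverse,
        PySem.List.pyRange_neg_one_eq_reverse, show (0:Int) + 1 = 1 by ring,
        PySem.List.pyRange_one_append 1 (size - i - 1 + 1) (size + 1) (by omega) (by omega),
        List.reverse_append]
  rw [hsplit, List.foldl_append]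
  rw [pvFold_hi size i _ (fun j hj => by
        have := (PySem.List.mem_pyRange_neg_one).1 hj; omega) [] num]
  rw [pvFold_lo size i _ (fun j hj => by
        have := (PySem.List.mem_pyRange_neg_one).1 hj; omega)]
  have hlen1 : ((PySem.List.pyRange size (size - i - 1) (-1)).length : Int) = i + 1 := by
    rw [PySem.List.length_pyRange_neg_one]; omega
  have hlen2' : (PySem.List.pyRange (size - i - 1) 0 (-1)).length = (size - 1 - i).toNat := by
    rw [PySem.List.length_pyRange_neg_one]; omega
  rw [hlen1, hlen2', List.append_nil, show num + (i + 1) - 1 = num + i by ring,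
      Prod.mk.injEq]
  exact ⟨rfl, by ring⟩

-- Triangular numbers: B's base at i = n.
def pvTri (n : Nat) : Int := ((n * (n + 1) / 2 : Nat) : Int)

lemma pvBase_eq (n : Nat) : PySem.Int.floordiv ((n : Int) * ((n : Int) + 1)) 2 = pvTri n := by
  rw [PySem.Int.floordiv_eq_ediv_of_pos (by norm_num)]
  unfold pvTri
  have h : (n : Int) * ((n : Int) + 1) = ((n * (n + 1) : Nat) : Int) := by push_cast; ring
  rw [h]
  generalize n * (n + 1) = m
  omega

lemma pvTri_succ (n : Nat) : pvTri (n + 1) = pvTri n + (n : Int) + 1 := by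
  unfold pvTri
  have h2 : 2 ∣ n * (n + 1) := (Nat.even_mul_succ_self n).two_dvd
  have h3 : (n + 1) * (n + 1 + 1) = n * (n + 1) + 2 * (n + 1) := by ring
  have h : (n + 1) * (n + 1 + 1) / 2 = n * (n + 1) / 2 + (n + 1) := by omega
  rw [h]; push_cast; ring

-- Outer-loop invariant: after the first n rows, A's state is (B's first n rows, tri n + 1).
lemma pvOuter (size : Int) : ∀ (n : Nat), (n : Int) ≤ size →
    ((PySem.List.pyRange 0 (n : Int) 1).foldl
      (fun (st : List (List Int) × Int) i =>
        let r := (PySem.List.pyRange size 0 (-1)).foldl (pvStep size i) ([], st.2)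
        (st.1 ++ [r.1], r.2))
      ([], 1))
    = ((PySem.List.pyRange 0 (n : Int) 1).foldl
        (fun (res : List (List Int)) i =>
          let base := PySem.Int.floordiv (i * (i + 1)) 2
          res ++ [List.replicate (size - 1 - i).toNat 0
            ++ PySem.List.pyRange (base + i + 1) base (-1)])
        [], pvTri n + 1) := by
  intro n
  induction n with
  | zero =>
    intro _
    simp [PySem.List.pyRange_one_eq_nil (by omega : (0:Int) ≤ 0), pvTri]
  | succ n ih =>
    intro hle
    have hle' : (n : Int) ≤ size := by push_cast at hle ⊢; omega
    have hsp : PySem.List.pyRange 0 ((n + 1 : Nat) : Int) 1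
        = PySem.List.pyRange 0 (n : Int) 1 ++ [(n : Int)] := by
      rw [show ((n + 1 : Nat) : Int) = (n : Int) + 1 by push_cast; ring,
          PySem.List.pyRange_one_succ_right (by omega)]
    rw [hsp, List.foldl_append, List.foldl_append, ih hle']
    simp only [List.foldl_cons, List.foldl_nil]
    rw [pvInner size (n : Int) (by omega) (by push_cast at hle; omega) (pvTri n + 1)]
    rw [pvBase_eq n, pvTri_succ n]
    rw [show pvTri n + 1 + (n : Int) = pvTri n + (n : Int) + 1 by ring,
        show pvTri n + 1 - 1 = pvTri n by ring]

-- ===== VERDICT (by name: the statement is the Claim_ definition above) =====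
theorem sixth_matrix_spec : Claim_equal_sixth_matrix := by
  intro size _
  unfold Spec_sixth_matrix sixth_matrix sixth_matrix_alt
  by_cases hpos : 0 < size
  · have hn : size = ((size.toNat : Nat) : Int) := by omega
    have h := congrArg Prod.fst (pvOuter size size.toNat (by omega))
    rw [show PySem.List.pyRange 0 size 1 = PySem.List.pyRange 0 ((size.toNat : Nat) : Int) 1 by
          rw [← hn]]
    exact h
  · rw [PySem.List.pyRange_one_eq_nil (by omega : size ≤ 0)]
    simp
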